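-- pv_equiv track=rewrite | github.com/rasyakeselekbatuginjal-lang/MonoGrafi | monografi.py | dna_decode
-- ===== SOURCE A (Python) =====
-- def dna_decode(encoded: str) -> str:
--     """Decode DNA sequence ke text"""
--     reverse_mapping = {'A': '00', 'C': '01', 'G': '10', 'T': '11'}
--
--     result = []
--     for seq in encoded.split():
--         if len(seq) != 4:
--             continue
--
--         binary = ''
--         for base in seq:
--             binary += reverse_mapping.get(base, '00')
--
--         try:
--             char_code = int(binary, 2)
--             result.append(chr(char_code))
--         except:
--             result.append('?')
--
--     return ''.join(result)
-- ===== SOURCE B (Python) =====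
-- def dna_decode(encoded: str) -> str:
--     """Decode DNA sequence ke text"""
--     base_val = {'A': 0, 'C': 1, 'G': 2, 'T': 3}
--     result = []
--     for seq in encoded.split():
--         if len(seq) != 4:
--             continue
--         code = 0
--         for base in seq:
--             code = code * 4 + base_val.get(base, 0)
--         result.append(chr(code))
--     return ''.join(result)
-- ===== Notes on version B (the rewrite author's own statement) =====
-- stated objective: simpler
-- what changed: Replaces the per-token binary-string construction plus int(binary,2) parse and the dead try/except with a direct Horner accumulation code = code*4 + value(base) over a numeric base map.
import Mathlib
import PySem

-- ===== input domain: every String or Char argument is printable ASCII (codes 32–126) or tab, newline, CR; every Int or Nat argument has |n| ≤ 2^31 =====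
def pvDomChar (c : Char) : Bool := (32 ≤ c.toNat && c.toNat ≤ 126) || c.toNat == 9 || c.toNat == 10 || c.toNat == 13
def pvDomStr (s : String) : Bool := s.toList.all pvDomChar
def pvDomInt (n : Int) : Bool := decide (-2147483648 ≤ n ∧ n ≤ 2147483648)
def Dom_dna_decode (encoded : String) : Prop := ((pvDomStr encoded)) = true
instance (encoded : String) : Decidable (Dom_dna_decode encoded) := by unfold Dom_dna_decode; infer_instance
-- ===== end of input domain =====

-- B replaces A's binary-string construction + int(binary,2) parse (and the dead try/except)
-- with a direct Horner accumulation over a numeric base map; objective: simpler.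

-- ===== PORT A =====
-- reverse_mapping = {'A': '00', 'C': '01', 'G': '10', 'T': '11'}
def rmA : PySem.Dict Char String :=
  ((((PySem.Dict.empty).insert 'A' "00").insert 'C' "01").insert 'G' "10").insert 'T' "11"

-- hand port of int(binary, 2): left-to-right accumulation, none on a non-binary digit
-- (exact here: binary built from rmA values is always a nonempty string of '0'/'1')
def parseBin2 : List Char → Int → Option Int
  | [], acc => some acc
  | c :: r, acc =>
    if c = '0' then parseBin2 r (2 * acc)
    else if c = '1' then parseBin2 r (2 * acc + 1)
    else none

def dna_decode (encoded : String) : String :=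
  let result : List Char :=
    (PySem.Str.split₀ encoded).foldl (fun res seq =>
      if PySem.Str.len seq ≠ 4 then res
      else
        let binary : List Char :=
          seq.toList.foldl (fun b base => b ++ (rmA.getD base "00").toList) []
        match parseBin2 binary 0 with
        | some code => res ++ [Char.ofNat code.toNat]
        | none => res ++ ['?']) []
  String.ofList result

-- ===== PORT B =====
-- base_val = {'A': 0, 'C': 1, 'G': 2, 'T': 3}
def rmB : PySem.Dict Char Int :=
  ((((PySem.Dict.empty).insert 'A' 0).insert 'C' 1).insert 'G' 2).insert 'T' 3

def dna_decode_alt (encoded : String) : String :=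
  let result : List Char :=
    (PySem.Str.split₀ encoded).foldl (fun res seq =>
      if PySem.Str.len seq ≠ 4 then res
      else
        let code : Int := seq.toList.foldl (fun a base => a * 4 + rmB.getD base 0) 0
        res ++ [Char.ofNat code.toNat]) []
  String.ofList result

-- ===== PRECONDITION & SPEC =====
def Spec_dna_decode (encoded : String) (out : String) : Prop := out = dna_decode_alt encoded
instance (encoded : String) (out : String) : Decidable (Spec_dna_decode encoded out) := by unfold Spec_dna_decode; infer_instance

-- ===== CLAIM (what is proved, stated in full; the proofs are below) =====
def Claim_equal_dna_decode : Prop := ∀ (encoded : String), Dom_dna_decode encoded → Spec_dna_decode encoded (dna_decode encoded)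

-- ===== LEMMAS AND PROOFS =====

-- Horner step: two binary digits for one base, consumed by parseBin2, are Horner's rule in base 4.
theorem parseBin2_step (base : Char) (rest : List Char) (acc : Int) :
    parseBin2 ((rmA.getD base "00").toList ++ rest) acc
      = parseBin2 rest (acc * 4 + rmB.getD base 0) := by
  by_cases hA : base = 'A'
  · subst hA; simp [rmA, rmB, PySem.Dict.getD, PySem.Dict.get?, PySem.Dict.insert, PySem.Dict.empty,
      parseBin2]; ring_nf
  · by_cases hC : base = 'C'
    · subst hC; simp [rmA, rmB, PySem.Dict.getD, PySem.Dict.get?, PySem.Dict.insert, PySem.Dict.empty,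
        parseBin2]; ring_nf
    · by_cases hG : base = 'G'
      · subst hG; simp [rmA, rmB, PySem.Dict.getD, PySem.Dict.get?, PySem.Dict.insert, PySem.Dict.empty,
          parseBin2]; ring_nf
      · by_cases hT : base = 'T'
        · subst hT; simp [rmA, rmB, PySem.Dict.getD, PySem.Dict.get?, PySem.Dict.insert, PySem.Dict.empty,
            parseBin2]; ring_nf
        · have h1 : ('A' == base) = false := by simp [Ne.symm hA]
          have h2 : ('C' == base) = false := by simp [Ne.symm hC]
          have h3 : ('G' == base) = false := by simp [Ne.symm hG]
          have h4 : ('T' == base) = false := by simp [Ne.symm hT]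
          simp [rmA, rmB, PySem.Dict.getD, PySem.Dict.get?, PySem.Dict.insert, PySem.Dict.empty,
            parseBin2, h1, h2, h3, h4]; ring_nf

-- A's parse of the accumulated binary string equals B's Horner accumulation, for any char list.
theorem parse_flatMap (cs : List Char) (acc : Int) :
    parseBin2 (cs.flatMap (fun base => (rmA.getD base "00").toList)) acc
      = some (cs.foldl (fun a base => a * 4 + rmB.getD base 0) acc) := by
  induction cs generalizing acc with
  | nil => rfl
  | cons c tl ih =>
    simp only [List.flatMap_cons, List.foldl_cons]
    rw [parseBin2_step, ih]

-- the two per-token step functions agree on every accumulator and every token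
theorem step_eq (res : List Char) (seq : String) :
    (if PySem.Str.len seq ≠ 4 then res
     else
       let binary : List Char :=
         seq.toList.foldl (fun b base => b ++ (rmA.getD base "00").toList) []
       match parseBin2 binary 0 with
       | some code => res ++ [Char.ofNat code.toNat]
       | none => res ++ ['?'])
    = (if PySem.Str.len seq ≠ 4 then res
       else
         let code : Int := seq.toList.foldl (fun a base => a * 4 + rmB.getD base 0) 0
         res ++ [Char.ofNat code.toNat]) := by
  by_cases h : PySem.Str.len seq ≠ 4
  · rw [if_pos h, if_pos h]
  · rw [if_neg h, if_neg h]
    simp only []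
    rw [PySem.List.foldl_append_eq_flatMap, List.nil_append, parse_flatMap]

-- ===== VERDICT (by name: the statement is the Claim_ definition above) =====
theorem dna_decode_spec : Claim_equal_dna_decode := by
  intro encoded _
  unfold Spec_dna_decode dna_decode dna_decode_alt
  simp only []
  congr 1
  apply PySem.List.foldl_congr_mem
  intro res seq _
  exact step_eq res seq
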